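-- pv_equiv track=rewrite | github.com/kirkcarlson/lumicube | community-scripts/game_of_life_phased.py | alive_to_str
-- ===== SOURCE A (Python) =====
-- def alive_to_str( alives):
--     string = ":" # start character
--     checksum = 0
--     for y in range (16):
--         row = 0
--         for x in range (16):
--             if x<8 or y<8:
--                 if (x, y) in alives:
--                     row |= 1 << x
--         if y<8:
--             string += "%04X-" % row
--         else:
--             string += "%02X-" % row
--         checksum += (row & 0xFF) + ((row >>8) & 0xFF) # sum over bytes
--     string += ("%02X" % (-checksum & 0xFF))
--     return string
-- ===== SOURCE B (Python) =====
-- def alive_to_str(alives):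
--     # Alternative: build the 16 row bitmasks by one pass over the alive points,
--     # then format + checksum in a second pass over the rows.
--     rows = [0] * 16
--     for p in alives:
--         if isinstance(p, tuple) and len(p) == 2:
--             x, y = p
--             if 0 <= x < 16 and 0 <= y < 16 and (x < 8 or y < 8):
--                 rows[y] |= 1 << x
--     string = ":"
--     checksum = 0
--     for y in range(16):
--         row = rows[y]
--         string += ("%04X-" if y < 8 else "%02X-") % row
--         checksum += (row & 0xFF) + ((row >> 8) & 0xFF)
--     return string + "%02X" % (-checksum & 0xFF)
-- ===== Notes on version B (the rewrite author's own statement) =====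
-- stated objective: alternative
-- what changed: Replaces the 256 per-cell membership probes of the grid with a single pass over the alive points that builds 16 row bitmasks, followed by one formatting/checksum pass over the 16 rows.
import Mathlib
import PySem

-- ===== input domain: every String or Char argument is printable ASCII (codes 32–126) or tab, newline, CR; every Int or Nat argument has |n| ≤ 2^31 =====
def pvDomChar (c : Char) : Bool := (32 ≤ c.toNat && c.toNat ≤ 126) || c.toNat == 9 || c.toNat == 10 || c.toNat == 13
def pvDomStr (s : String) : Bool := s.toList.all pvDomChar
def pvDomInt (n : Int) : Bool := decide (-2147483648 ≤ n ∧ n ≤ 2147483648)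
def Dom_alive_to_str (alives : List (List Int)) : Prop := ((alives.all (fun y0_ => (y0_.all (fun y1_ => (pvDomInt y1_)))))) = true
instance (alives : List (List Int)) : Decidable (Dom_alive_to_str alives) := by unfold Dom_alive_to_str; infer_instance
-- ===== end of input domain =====

-- B replaces A's 256 per-cell membership probes by one pass over the alive
-- points building 16 row bitmasks plus one formatting/checksum pass (alternative).

-- uppercase hex digit of n < 16 (exact for "%X" on one nibble)
def pvHexDigit (n : Nat) : Char := if n < 10 then Char.ofNat (48 + n) else Char.ofNat (55 + n)
-- "%02X" % n for 0 ≤ n < 256 (exact on that range, the only one reached)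
def pvHex2 (n : Nat) : String := String.ofList [pvHexDigit ((n >>> 4) &&& 15), pvHexDigit (n &&& 15)]
-- "%04X" % n for 0 ≤ n < 65536 (exact on that range, the only one reached)
def pvHex4 (n : Nat) : String :=
  String.ofList [pvHexDigit ((n >>> 12) &&& 15), pvHexDigit ((n >>> 8) &&& 15),
    pvHexDigit ((n >>> 4) &&& 15), pvHexDigit (n &&& 15)]

-- ===== PORT A =====
def alive_to_str (alives : List (List Int)) : String :=
  let res := (List.range 16).foldl (fun (sc : String × Nat) (y : Nat) =>
    let row := (List.range 16).foldl (fun (row : Nat) (x : Nat) =>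
      if (x < 8 ∨ y < 8) ∧ [(x : Int), (y : Int)] ∈ alives then row ||| ((1 : Nat) <<< x) else row) 0
    ((sc.1 ++ (if y < 8 then pvHex4 row else pvHex2 row) ++ "-"),
     sc.2 + ((row &&& 255) + ((row >>> 8) &&& 255)))) (":", 0)
  res.1 ++ pvHex2 (((-(res.2 : Int)) % 256).toNat)

-- ===== PORT B =====
def alive_to_str_alt (alives : List (List Int)) : String :=
  let rows := alives.foldl (fun (rows : List Nat) p =>
    match p with
    | [x, y] =>
      if 0 ≤ x ∧ x < 16 ∧ 0 ≤ y ∧ y < 16 ∧ (x < 8 ∨ y < 8) then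
        rows.set y.toNat ((rows.getD y.toNat 0) ||| ((1 : Nat) <<< x.toNat))
      else rows
    | _ => rows) (List.replicate 16 0)
  let res := (List.range 16).foldl (fun (sc : String × Nat) (y : Nat) =>
    let row := rows.getD y 0
    ((sc.1 ++ (if y < 8 then pvHex4 row else pvHex2 row) ++ "-"),
     sc.2 + ((row &&& 255) + ((row >>> 8) &&& 255)))) (":", 0)
  res.1 ++ pvHex2 (((-(res.2 : Int)) % 256).toNat)

-- ===== PRECONDITION & SPEC =====
def Spec_alive_to_str (alives : List (List Int)) (out : String) : Prop := out = alive_to_str_alt alives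
instance (alives : List (List Int)) (out : String) : Decidable (Spec_alive_to_str alives out) := by unfold Spec_alive_to_str; infer_instance

-- ===== CLAIM (what is proved, stated in full; the proofs are below) =====
def Claim_equal_alive_to_str : Prop := ∀ (alives : List (List Int)), Dom_alive_to_str alives → Spec_alive_to_str alives (alive_to_str alives)

-- ===== LEMMAS AND PROOFS =====

-- A's inner loop, named for the proofs
def pvRowA (alives : List (List Int)) (y : Nat) : Nat :=
  (List.range 16).foldl (fun (row : Nat) (x : Nat) =>
    if (x < 8 ∨ y < 8) ∧ [(x : Int), (y : Int)] ∈ alives then row ||| ((1 : Nat) <<< x) else row) 0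

-- B's loop body, named for the proofs
def pvStep (rows : List Nat) (p : List Int) : List Nat :=
  match p with
  | [x, y] =>
    if 0 ≤ x ∧ x < 16 ∧ 0 ≤ y ∧ y < 16 ∧ (x < 8 ∨ y < 8) then
      rows.set y.toNat ((rows.getD y.toNat 0) ||| ((1 : Nat) <<< x.toNat))
    else rows
  | _ => rows

-- B's second pass, abstracted over the row source (both ports' second pass is this, by rfl)
def pvFmt (rowf : Nat → Nat) : String :=
  let res := (List.range 16).foldl (fun (sc : String × Nat) (y : Nat) =>
    let row := rowf y
    ((sc.1 ++ (if y < 8 then pvHex4 row else pvHex2 row) ++ "-"),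
     sc.2 + ((row &&& 255) + ((row >>> 8) &&& 255)))) (":", 0)
  res.1 ++ pvHex2 (((-(res.2 : Int)) % 256).toNat)

lemma testBit_foldl_range (c : Nat → Bool) (n b : Nat) : ∀ acc : Nat,
    ((List.range n).foldl (fun r x => if c x then r ||| ((1 : Nat) <<< x) else r) acc).testBit b
      = (acc.testBit b || (decide (b < n) && c b)) := by
  induction n with
  | zero => simp
  | succ n ih =>
    intro acc
    rw [List.range_succ, List.foldl_append, List.foldl_cons, List.foldl_nil]
    by_cases h : c n
    · rw [if_pos h, Nat.testBit_or, ih, Nat.shiftLeft_eq, one_mul, Nat.testBit_two_pow]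
      by_cases hb : b = n
      · subst hb; simp [h]
      · have h2 : (decide (b < n + 1) : Bool) = decide (b < n) := by
          simp only [decide_eq_decide]; omega
        have h3 : (decide (b ≤ n) : Bool) = decide (b < n) := by
          simp only [decide_eq_decide]; omega
        simp [Ne.symm hb, h3]
    · rw [if_neg (by simp [h]), ih]
      by_cases hb : b = n
      · subst hb; simp [h]
      · have h2 : (decide (b < n + 1) : Bool) = decide (b < n) := by
          simp only [decide_eq_decide]; omega
        rw [h2]

lemma testBit_pvRowA (alives : List (List Int)) (y b : Nat) :
    (pvRowA alives y).testBit b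
      = (decide (b < 16) && decide ((b < 8 ∨ y < 8) ∧ [(b : Int), (y : Int)] ∈ alives)) := by
  have h := testBit_foldl_range
    (fun x => decide ((x < 8 ∨ y < 8) ∧ [(x : Int), (y : Int)] ∈ alives)) 16 b 0
  simpa [pvRowA] using h

lemma pvStep_len (rows : List Nat) (p : List Int) : (pvStep rows p).length = rows.length := by
  rcases p with _ | ⟨x, _ | ⟨y, _ | ⟨z, t⟩⟩⟩ <;> simp [pvStep] <;> split <;> simp

lemma pvStep_testBit (rows : List Nat) (p : List Int) (hlen : rows.length = 16)
    (y : Nat) (hy : y < 16) (b : Nat) :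
    ((pvStep rows p).getD y 0).testBit b
      = ((rows.getD y 0).testBit b ||
          decide (b < 16 ∧ (b < 8 ∨ y < 8) ∧ [(b : Int), (y : Int)] = p)) := by
  rcases p with _ | ⟨x, _ | ⟨y', _ | ⟨z, t⟩⟩⟩
  · simp [pvStep]
  · simp [pvStep]
  · rw [pvStep]
    by_cases hg : 0 ≤ x ∧ x < 16 ∧ 0 ≤ y' ∧ y' < 16 ∧ (x < 8 ∨ y' < 8)
    · rw [if_pos hg]
      by_cases hyy : y = y'.toNat
      · subst hyy
        have hlt : y'.toNat < rows.length := by omega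
        rw [List.getD_eq_getElem?_getD, List.getElem?_set_self (by omega),
          Option.getD_some, Nat.testBit_or, Nat.shiftLeft_eq, one_mul,
          Nat.testBit_two_pow, List.getD_eq_getElem?_getD]
        have : (decide (x.toNat = b) : Bool)
            = decide (b < 16 ∧ (b < 8 ∨ y'.toNat < 8) ∧ [(b : Int), (y'.toNat : Int)] = [x, y']) := by
          simp only [decide_eq_decide, List.cons.injEq, and_true]
          omega
        rw [this]
      · rw [List.getD_eq_getElem?_getD, List.getElem?_set_ne (by omega)]
        have h5 : ¬(b < 16 ∧ (b < 8 ∨ y < 8) ∧ [(b : Int), (y : Int)] = [x, y']) := by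
          simp only [List.cons.injEq, and_true]
          omega
        rw [decide_eq_false h5, Bool.or_false]
        rfl
    · rw [if_neg hg]
      have h5 : ¬(b < 16 ∧ (b < 8 ∨ y < 8) ∧ [(b : Int), (y : Int)] = [x, y']) := by
        simp only [List.cons.injEq, and_true]
        omega
      rw [decide_eq_false h5, Bool.or_false]
  · have h5 : ¬(b < 16 ∧ (b < 8 ∨ y < 8) ∧ [(b : Int), (y : Int)] = x :: y' :: z :: t) := by
      simp
    rw [pvStep, decide_eq_false h5, Bool.or_false]
    intro a c hcc
    simp at hcc

lemma pvRowsB_spec (l : List (List Int)) : ∀ (rows : List Nat), rows.length = 16 →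
    (l.foldl pvStep rows).length = 16 ∧
    ∀ y < 16, ∀ b,
      ((l.foldl pvStep rows).getD y 0).testBit b
        = ((rows.getD y 0).testBit b ||
            decide (b < 16 ∧ (b < 8 ∨ y < 8) ∧ [(b : Int), (y : Int)] ∈ l)) := by
  induction l with
  | nil => intro rows hlen; refine ⟨hlen, ?_⟩; intro y hy b; simp
  | cons p l ih =>
    intro rows hlen
    have hl1 : (pvStep rows p).length = 16 := by rw [pvStep_len]; exact hlen
    obtain ⟨hl2, hc2⟩ := ih (pvStep rows p) hl1
    refine ⟨by simpa using hl2, ?_⟩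
    intro y hy b
    rw [List.foldl_cons, hc2 y hy b, pvStep_testBit rows p hlen y hy b, Bool.or_assoc]
    congr 1
    simp only [List.mem_cons]
    by_cases h1 : b < 16 ∧ (b < 8 ∨ y < 8) ∧ [(b : Int), (y : Int)] = p <;>
      by_cases h2 : b < 16 ∧ (b < 8 ∨ y < 8) ∧ [(b : Int), (y : Int)] ∈ l <;>
      simp [h1, h2] <;> tauto

lemma rowsB_eq_rowA (alives : List (List Int)) (y : Nat) (hy : y < 16) :
    (alives.foldl pvStep (List.replicate 16 0)).getD y 0 = pvRowA alives y := by
  obtain ⟨-, hc⟩ := pvRowsB_spec alives (List.replicate 16 0) (by simp)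
  apply Nat.eq_of_testBit_eq
  intro b
  rw [hc y hy b, testBit_pvRowA]
  have h0 : ((List.replicate 16 (0 : Nat)).getD y 0) = (0 : Nat) := by
    rw [List.getD_eq_getElem?_getD, List.getElem?_replicate]
    split <;> rfl
  rw [h0, Nat.zero_testBit, Bool.false_or, Bool.decide_and]

lemma pvFmt_congr (f g : Nat → Nat) (h : ∀ y < 16, f y = g y) : pvFmt f = pvFmt g := by
  unfold pvFmt
  have : (List.range 16).foldl (fun (sc : String × Nat) (y : Nat) =>
      ((sc.1 ++ (if y < 8 then pvHex4 (f y) else pvHex2 (f y)) ++ "-"),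
       sc.2 + (((f y) &&& 255) + (((f y) >>> 8) &&& 255)))) (":", 0)
    = (List.range 16).foldl (fun (sc : String × Nat) (y : Nat) =>
      ((sc.1 ++ (if y < 8 then pvHex4 (g y) else pvHex2 (g y)) ++ "-"),
       sc.2 + (((g y) &&& 255) + (((g y) >>> 8) &&& 255)))) (":", 0) := by
    apply List.foldl_ext
    intro a x hx
    rw [h x (List.mem_range.mp hx)]
  rw [this]

-- ===== VERDICT (by name: the statement is the Claim_ definition above) =====
theorem alive_to_str_spec : Claim_equal_alive_to_str := by
  intro alives _
  show alive_to_str alives = alive_to_str_alt alives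
  have ha : alive_to_str alives = pvFmt (pvRowA alives) := rfl
  have hb : alive_to_str_alt alives
      = pvFmt (fun y => (alives.foldl pvStep (List.replicate 16 0)).getD y 0) := rfl
  rw [ha, hb]
  exact pvFmt_congr _ _ (fun y hy => (rowsB_eq_rowA alives y hy).symm)
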